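-- pv_equiv track=rewrite | github.com/lwsamaha/salesforce-id-converter | sfid.py | to_long_id
-- ===== SOURCE A (Python) =====
-- char_codes = {
--     "00000": 'A', "00001": 'B', "00010": 'C', "00011": 'D', "00100": 'E',
--     "00101": 'F', "00110": 'G', "00111": 'H', "01000": 'I', "01001": 'J',
--     "01010": 'K', "01011": 'L', "01100": 'M', "01101": 'N', "01110": 'O',
--     "01111": 'P', "10000": 'Q', "10001": 'R', "10010": 'S', "10011": 'T',
--     "10100": 'U', "10101": 'V', "10110": 'W', "10111": 'X', "11000": 'Y',
--     "11001": 'Z', "11010": '0', "11011": '1', "11100": '2', "11101": '3',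
--     "11110": '4', "11111": '5'
-- }
--
-- def to_long_id(short_id):
--     """
--     Given a 15 character "short" Salesforce identifier, compute the 18 character
--     Salesforce ID that matches the 15 character ID. The algorithm given by Salesforce is as follows:
--     Break any 15 character Salesforce ID into 3 strings of 5 characters. Reverse the characters in each.
--     Convert all uppercase alpha characters to 1. Convert any other character to 0. Find each result
--     in the char lookup table. Append them to the original ID.
--
--     :return: an 18 character Salesforce ID that matches the 15 character ID
--     """
--     if short_id is None or len(short_id) != 15:
--         return None
--
--     # break into 3 parts
--     id_parts = [short_id[0:5], short_id[5:10], short_id[10:15]]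
--
--     # reverse each
--     id_parts = [word[::-1] for word in id_parts]
--
--     # swap 0|1 for uppercase alpha char|others, ie convert our alpha id into a binary id
--     binary_parts = []
--     for id_part in id_parts:
--         binary_id_part = []
--         # Use the list comprehension to place the binary id part into 'binary_id_part'
--         [binary_id_part.append('1' if first_char.istitle() else '0') for first_char in id_part]
--         # Now add this part to binary_parts which is our final goal
--         binary_parts.append(''.join(binary_id_part))
--
--     # append the matching letter code for each set of 0s and 1s to the short ID
--     suffix = []
--     [suffix.append(char_codes[binary_part]) for binary_part in binary_parts]
--
--     return short_id + ''.join(suffix)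
-- ===== SOURCE B (Python) =====
-- ALPHABET = 'ABCDEFGHIJKLMNOPQRSTUVWXYZ012345'
--
-- def to_long_id(short_id):
--     if short_id is None or len(short_id) != 15:
--         return None
--     suffix = []
--     for p in range(0, 15, 5):
--         idx = 0
--         for i in range(5):
--             if short_id[p + i].istitle():
--                 idx += 1 << i
--         suffix.append(ALPHABET[idx])
--     return short_id + ''.join(suffix)
-- ===== Notes on version B (the rewrite author's own statement) =====
-- stated objective: idiomatic
-- what changed: B drops the slice/reverse/binary-string/dict pipeline and instead computes each suffix character directly as ALPHABET[idx] where idx sums bit weights 1<<i for uppercase positions, indexing a single alphabet string.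
import Mathlib
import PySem

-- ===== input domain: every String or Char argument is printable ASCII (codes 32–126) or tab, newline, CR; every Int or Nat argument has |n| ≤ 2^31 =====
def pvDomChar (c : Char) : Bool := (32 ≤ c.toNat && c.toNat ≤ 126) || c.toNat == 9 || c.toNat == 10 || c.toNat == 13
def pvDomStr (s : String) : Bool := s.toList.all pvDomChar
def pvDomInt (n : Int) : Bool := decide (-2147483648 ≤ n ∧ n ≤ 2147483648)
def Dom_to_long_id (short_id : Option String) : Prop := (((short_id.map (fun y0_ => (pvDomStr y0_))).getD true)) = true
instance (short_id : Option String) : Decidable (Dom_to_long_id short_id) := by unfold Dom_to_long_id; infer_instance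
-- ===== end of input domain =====

-- B replaces the reverse / binary-string / dict pipeline by a direct bit-weight sum indexing one alphabet string (idiomatic).

-- single-character str.istitle(): on the printable-ASCII domain this is exactly "is an uppercase letter"
def pyIstitleChar (c : Char) : Bool := PySem.Chars.isupper c

-- ===== PORT A =====
-- the module-level char_codes dict (keys as List Char, the PySem string representation)
def pvCharCodes : PySem.Dict (List Char) Char := PySem.Dict.mk [
  ("00000".toList, 'A'),
  ("00001".toList, 'B'),
  ("00010".toList, 'C'),
  ("00011".toList, 'D'),
  ("00100".toList, 'E'),
  ("00101".toList, 'F'),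
  ("00110".toList, 'G'),
  ("00111".toList, 'H'),
  ("01000".toList, 'I'),
  ("01001".toList, 'J'),
  ("01010".toList, 'K'),
  ("01011".toList, 'L'),
  ("01100".toList, 'M'),
  ("01101".toList, 'N'),
  ("01110".toList, 'O'),
  ("01111".toList, 'P'),
  ("10000".toList, 'Q'),
  ("10001".toList, 'R'),
  ("10010".toList, 'S'),
  ("10011".toList, 'T'),
  ("10100".toList, 'U'),
  ("10101".toList, 'V'),
  ("10110".toList, 'W'),
  ("10111".toList, 'X'),
  ("11000".toList, 'Y'),
  ("11001".toList, 'Z'),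
  ("11010".toList, '0'),
  ("11011".toList, '1'),
  ("11100".toList, '2'),
  ("11101".toList, '3'),
  ("11110".toList, '4'),
  ("11111".toList, '5')]

def to_long_id (short_id : Option String) : Option String :=
  match short_id with
  | none => none                                 -- short_id is None
  | some s =>
    if PySem.Str.len s ≠ 15 then none            -- len(short_id) != 15
    else
      let cs := s.toList
      -- id_parts = [short_id[0:5], short_id[5:10], short_id[10:15]]
      let id_parts := [PySem.List.slice cs (some 0) (some 5),
                       PySem.List.slice cs (some 5) (some 10),
                       PySem.List.slice cs (some 10) (some 15)]
      -- id_parts = [word[::-1] for word in id_parts]  (s[::-1] is reverse: PySem.List.slice?_none_none_neg_one)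
      let id_parts := id_parts.map (fun w => w.reverse)
      -- binary_parts: '1' if istitle else '0' for each char, joined
      let binary_parts := id_parts.map (fun p => p.map (fun c => if pyIstitleChar c then '1' else '0'))
      -- suffix: char_codes[binary_part]; the key is always a 5-char 0/1 string, so the lookup never fails (no KeyError)
      let suffix := binary_parts.map (fun bp => (pvCharCodes.get? bp).getD 'A')
      some (String.ofList (cs ++ suffix))

-- ===== PORT B =====
def pvAlphabet : List Char := "ABCDEFGHIJKLMNOPQRSTUVWXYZ012345".toList

def to_long_id_alt (short_id : Option String) : Option String :=
  match short_id with
  | none => none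
  | some s =>
    if PySem.Str.len s ≠ 15 then none
    else
      let cs := s.toList
      -- for p in range(0, 15, 5): idx = sum of bit weights; append ALPHABET[idx]
      let suffix := (PySem.List.pyRange 0 15 5).map (fun p =>
        let idx := (PySem.List.pyRange 0 5 1).foldl (fun idx i =>
          if pyIstitleChar ((PySem.List.pyGet? cs (p + i)).getD ' ') then idx + ((1:Int) <<< i.toNat) else idx) (0 : Int)
        -- p+i < 15 = len(cs) and 0 ≤ idx < 32, so both pyGet? are always some (no IndexError)
        (PySem.List.pyGet? pvAlphabet idx).getD ' ')
      some (String.ofList (cs ++ suffix))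

-- ===== PRECONDITION & SPEC =====
def Spec_to_long_id (short_id : Option String) (out : Option String) : Prop := out = to_long_id_alt short_id
instance (short_id : Option String) (out : Option String) : Decidable (Spec_to_long_id short_id out) := by unfold Spec_to_long_id; infer_instance

-- ===== CLAIM (what is proved, stated in full; the proofs are below) =====
def Claim_equal_to_long_id : Prop := ∀ (short_id : Option String), Dom_to_long_id short_id → Spec_to_long_id short_id (to_long_id short_id)

-- ===== LEMMAS AND PROOFS =====

lemma pv_exists15 (l : List Char) (h : l.length = 15) :
    ∃ c0 c1 c2 c3 c4 c5 c6 c7 c8 c9 c10 c11 c12 c13 c14,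
      l = [c0, c1, c2, c3, c4, c5, c6, c7, c8, c9, c10, c11, c12, c13, c14] := by
  rcases l with _ | ⟨c0, l⟩; · simp at h
  rcases l with _ | ⟨c1, l⟩; · simp at h
  rcases l with _ | ⟨c2, l⟩; · simp at h
  rcases l with _ | ⟨c3, l⟩; · simp at h
  rcases l with _ | ⟨c4, l⟩; · simp at h
  rcases l with _ | ⟨c5, l⟩; · simp at h
  rcases l with _ | ⟨c6, l⟩; · simp at h
  rcases l with _ | ⟨c7, l⟩; · simp at h
  rcases l with _ | ⟨c8, l⟩; · simp at h
  rcases l with _ | ⟨c9, l⟩; · simp at h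
  rcases l with _ | ⟨c10, l⟩; · simp at h
  rcases l with _ | ⟨c11, l⟩; · simp at h
  rcases l with _ | ⟨c12, l⟩; · simp at h
  rcases l with _ | ⟨c13, l⟩; · simp at h
  rcases l with _ | ⟨c14, l⟩; · simp at h
  rcases l with _ | ⟨c15, l⟩
  · exact ⟨c0, c1, c2, c3, c4, c5, c6, c7, c8, c9, c10, c11, c12, c13, c14, rfl⟩
  · simp at h

-- ===== VERDICT (by name: the statement is the Claim_ definition above) =====
theorem to_long_id_spec : Claim_equal_to_long_id := by
  intro short_id hdom
  unfold Spec_to_long_id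
  cases short_id with
  | none => rfl
  | some s =>
    by_cases h : PySem.Str.len s = 15
    · have hl : s.toList.length = 15 := by
        have := PySem.Str.len_eq s; omega
      obtain ⟨c0,c1,c2,c3,c4,c5,c6,c7,c8,c9,c10,c11,c12,c13,c14, hs⟩ := pv_exists15 _ hl
      simp only [to_long_id, to_long_id_alt, if_neg (by omega : ¬ PySem.Str.len s ≠ 15), hs]
      simp [PySem.List.slice_toNat, show PySem.List.pyRange 0 15 5 = [0,5,10] from by decide,
            show PySem.List.pyRange 0 5 1 = [0,1,2,3,4] from by decide, List.foldl]
      refine congrArg String.ofList ?_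
      simp only [List.cons.injEq, true_and, and_true]
      refine ⟨?_, ?_, ?_⟩
      ·
        generalize pyIstitleChar c0 = b0
        generalize pyIstitleChar c1 = b1
        generalize pyIstitleChar c2 = b2
        generalize pyIstitleChar c3 = b3
        generalize pyIstitleChar c4 = b4
        revert b0 b1 b2 b3 b4
        decide
      ·
        generalize pyIstitleChar c5 = b0
        generalize pyIstitleChar c6 = b1
        generalize pyIstitleChar c7 = b2
        generalize pyIstitleChar c8 = b3
        generalize pyIstitleChar c9 = b4
        revert b0 b1 b2 b3 b4
        decide
      ·
        generalize pyIstitleChar c10 = b0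
        generalize pyIstitleChar c11 = b1
        generalize pyIstitleChar c12 = b2
        generalize pyIstitleChar c13 = b3
        generalize pyIstitleChar c14 = b4
        revert b0 b1 b2 b3 b4
        decide
    · simp only [to_long_id, to_long_id_alt]
      rw [if_pos (by omega : PySem.Str.len s ≠ 15), if_pos (by omega : PySem.Str.len s ≠ 15)]
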